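-- pv_equiv track=rewrite | github.com/kNalj/AdventOfCode2020 | day11/11.py | check_adjecent
-- ===== SOURCE A (Python) =====
-- def check_adjecent(x, y, data):
--
--     if x == 0:
--         if y == 0:
--             adjecents = [data[x][y + 1], data[x + 1][y], data[x + 1][y + 1]]
--         elif y == len(data[0]) - 1:
--             adjecents = [data[x][y - 1], data[x + 1][y - 1], data[x + 1][y]]
--         else:
--             adjecents = [data[x][y - 1], data[x][y + 1], data[x + 1][y - 1], data[x + 1][y], data[x + 1][y + 1]]
--     elif y == 0:
--         if x == len(data) - 1:
--             adjecents = [data[x - 1][y], data[x - 1][y + 1], data[x][y + 1]]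
--         else:
--             adjecents = [data[x - 1][y], data[x - 1][y + 1], data[x][y + 1], data[x + 1][y], data[x + 1][y + 1]]
--     elif y == len(data[0]) - 1:
--         if x == len(data) - 1:
--             adjecents = [data[x - 1][y - 1], data[x - 1][y], data[x][y - 1]]
--         else:
--             adjecents = [data[x - 1][y - 1], data[x - 1][y], data[x][y - 1], data[x + 1][y - 1], data[x + 1][y]]
--     elif x == len(data) - 1:
--         adjecents = [data[x - 1][y - 1], data[x - 1][y], data[x - 1][y + 1], data[x][y - 1], data[x][y + 1]]
--     else:
--         adjecents = [data[x - 1][y - 1], data[x - 1][y], data[x - 1][y + 1],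
--                      data[x][y - 1], data[x][y + 1],
--                      data[x + 1][y - 1], data[x + 1][y], data[x + 1][y + 1]]
--
--     free, occupied = 0, 0
--     for seat in adjecents:
--         if seat == "#":
--             occupied += 1
--         elif seat == "L":
--             free += 1
--
--     return free, occupied
-- ===== SOURCE B (Python) =====
-- def check_adjecent(x, y, data):
--     if not (0 <= x < len(data) and 0 <= y < len(data[0])):
--         raise IndexError("seat position out of range")
--     free, occupied = 0, 0
--     for dx, dy in ((-1, -1), (-1, 0), (-1, 1), (0, -1), (0, 1), (1, -1), (1, 0), (1, 1)):
--         nx, ny = x + dx, y + dy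
--         if 0 <= nx < len(data) and 0 <= ny < len(data[0]):
--             seat = data[nx][ny]
--             if seat == "#":
--                 occupied += 1
--             elif seat == "L":
--                 free += 1
--     return free, occupied
-- ===== Notes on version B (the rewrite author's own statement) =====
-- stated objective: simpler
-- what changed: Replaces A's nine-way corner/edge/interior case analysis building an explicit adjacency list with a single loop over the eight neighbor offsets guarded by one bounds check, after validating that (x, y) is a real grid position.
-- outside the precondition, e.g. on check_adjecent(-1, 0, [['#', 'L'], ['.', '#']]): A returns (2, 3), B raises IndexError; on check_adjecent(0, 0, [['.', '#']]): A raises IndexError, B returns (0, 1)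
import Mathlib
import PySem

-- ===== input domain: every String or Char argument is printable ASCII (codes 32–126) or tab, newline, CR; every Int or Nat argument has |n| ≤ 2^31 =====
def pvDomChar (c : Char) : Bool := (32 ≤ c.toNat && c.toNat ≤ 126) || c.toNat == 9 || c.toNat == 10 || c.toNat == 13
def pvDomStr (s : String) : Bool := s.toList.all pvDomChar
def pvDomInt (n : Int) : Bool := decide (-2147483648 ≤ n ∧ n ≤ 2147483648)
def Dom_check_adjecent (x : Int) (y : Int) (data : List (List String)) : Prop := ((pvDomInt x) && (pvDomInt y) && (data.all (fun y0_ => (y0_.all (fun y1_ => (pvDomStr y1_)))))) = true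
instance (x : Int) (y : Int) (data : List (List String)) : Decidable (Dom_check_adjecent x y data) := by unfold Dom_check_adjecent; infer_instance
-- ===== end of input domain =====

-- B replaces A's nine-way corner/edge/interior case analysis by one bounds-checked loop over the
-- eight neighbor offsets (objective: simpler; same cost).

-- ===== PORT A =====
-- data[i][j] with Python indexing (pyGet? wraps negative indices exactly like Python); the ""
-- default stands only where Python would raise IndexError, which Pre_ excludes — exact on Pre_.
def pvCellA (data : List (List String)) (i j : Int) : String :=
  ((PySem.List.pyGet? data i).bind (fun row => PySem.List.pyGet? row j)).getD ""

-- the body of A's counting loop over `adjecents`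
def pvCountA (st : Int × Int) (seat : String) : Int × Int :=
  if seat = "#" then (st.1, st.2 + 1)
  else if seat = "L" then (st.1 + 1, st.2)
  else st

def check_adjecent (x : Int) (y : Int) (data : List (List String)) : Int × Int :=
  (if x = 0 then
    if y = 0 then
      [pvCellA data x (y+1), pvCellA data (x+1) y, pvCellA data (x+1) (y+1)]
    else if y = ((((PySem.List.pyGet? data 0).getD []).length : Int)) - 1 then
      [pvCellA data x (y-1), pvCellA data (x+1) (y-1), pvCellA data (x+1) y]
    else
      [pvCellA data x (y-1), pvCellA data x (y+1), pvCellA data (x+1) (y-1), pvCellA data (x+1) y, pvCellA data (x+1) (y+1)]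
  else if y = 0 then
    if x = (data.length : Int) - 1 then
      [pvCellA data (x-1) y, pvCellA data (x-1) (y+1), pvCellA data x (y+1)]
    else
      [pvCellA data (x-1) y, pvCellA data (x-1) (y+1), pvCellA data x (y+1), pvCellA data (x+1) y, pvCellA data (x+1) (y+1)]
  else if y = ((((PySem.List.pyGet? data 0).getD []).length : Int)) - 1 then
    if x = (data.length : Int) - 1 then
      [pvCellA data (x-1) (y-1), pvCellA data (x-1) y, pvCellA data x (y-1)]
    else
      [pvCellA data (x-1) (y-1), pvCellA data (x-1) y, pvCellA data x (y-1), pvCellA data (x+1) (y-1), pvCellA data (x+1) y]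
  else if x = (data.length : Int) - 1 then
    [pvCellA data (x-1) (y-1), pvCellA data (x-1) y, pvCellA data (x-1) (y+1), pvCellA data x (y-1), pvCellA data x (y+1)]
  else
    [pvCellA data (x-1) (y-1), pvCellA data (x-1) y, pvCellA data (x-1) (y+1),
     pvCellA data x (y-1), pvCellA data x (y+1),
     pvCellA data (x+1) (y-1), pvCellA data (x+1) y, pvCellA data (x+1) (y+1)]).foldl pvCountA (0, 0)

-- ===== PORT B =====
-- one iteration of B's loop: bounds check, then read and count the neighbor
def pvStepB (x y rows cols : Int) (data : List (List String)) (st : Int × Int) (d : Int × Int) : Int × Int :=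
  if 0 ≤ x + d.1 ∧ x + d.1 < rows ∧ 0 ≤ y + d.2 ∧ y + d.2 < cols then
    let seat := ((PySem.List.pyGet? data (x + d.1)).bind (fun row => PySem.List.pyGet? row (y + d.2))).getD ""
    if seat = "#" then (st.1, st.2 + 1)
    else if seat = "L" then (st.1 + 1, st.2)
    else st
  else st

def check_adjecent_alt (x : Int) (y : Int) (data : List (List String)) : Int × Int :=
  -- Python B raises IndexError when the validation fails (and on an empty `data`, via len(data[0]));
  -- the (0, 0) default stands for that raise — those inputs are outside Pre_.
  if 0 ≤ x ∧ x < (data.length : Int) ∧ 0 ≤ y ∧ y < ((((PySem.List.pyGet? data 0).getD []).length : Int)) then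
    ([(-1,-1),(-1,0),(-1,1),(0,-1),(0,1),(1,-1),(1,0),(1,1)] : List (Int × Int)).foldl
      (pvStepB x y (data.length : Int) ((((PySem.List.pyGet? data 0).getD []).length : Int)) data) (0, 0)
  else (0, 0)

-- ===== PRECONDITION & SPEC =====
-- Pre_ restricts to the function's natural domain: rectangular grids with at least 2 rows and 2
-- columns and in-range coordinates; outside it A raises IndexError (degenerate or ragged grids,
-- coordinates past the grid) or returns values via Python's negative-index wraparound.
def Pre_check_adjecent (x : Int) (y : Int) (data : List (List String)) : Prop :=
  2 ≤ data.length ∧ 2 ≤ (data.headD []).length ∧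
  (∀ row ∈ data, row.length = (data.headD []).length) ∧
  0 ≤ x ∧ x < (data.length : Int) ∧ 0 ≤ y ∧ y < ((data.headD []).length : Int)
instance (x : Int) (y : Int) (data : List (List String)) : Decidable (Pre_check_adjecent x y data) := by unfold Pre_check_adjecent; infer_instance

def pvWitness_check_adjecent : Int × Int × List (List String) := (0, 0, [["#", "L"], [".", "#"]])

def Spec_check_adjecent (x : Int) (y : Int) (data : List (List String)) (out : Int × Int) : Prop := out = check_adjecent_alt x y data
instance (x : Int) (y : Int) (data : List (List String)) (out : Int × Int) : Decidable (Spec_check_adjecent x y data out) := by unfold Spec_check_adjecent; infer_instance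

-- ===== CLAIM (what is proved, stated in full; the proofs are below) =====
def Claim_equal_check_adjecent : Prop := ∀ (x : Int) (y : Int) (data : List (List String)), Dom_check_adjecent x y data → Pre_check_adjecent x y data → Spec_check_adjecent x y data (check_adjecent x y data)

-- ===== LEMMAS AND PROOFS =====

lemma pvStepB_in (x y rows cols : Int) (data : List (List String)) (st : Int × Int) (dx dy : Int)
    (h : 0 ≤ x + dx ∧ x + dx < rows ∧ 0 ≤ y + dy ∧ y + dy < cols) :
    pvStepB x y rows cols data st (dx, dy) = pvCountA st (pvCellA data (x + dx) (y + dy)) := by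
  simp only [pvStepB, pvCellA, pvCountA, if_pos h]
  rfl

lemma pvStepB_out (x y rows cols : Int) (data : List (List String)) (st : Int × Int) (dx dy : Int)
    (h : ¬ (0 ≤ x + dx ∧ x + dx < rows ∧ 0 ≤ y + dy ∧ y + dy < cols)) :
    pvStepB x y rows cols data st (dx, dy) = st := by
  simp only [pvStepB, if_neg h]

lemma pv_add_neg_one (a : Int) : a + -1 = a - 1 := by ring
lemma pv_add_zero (a : Int) : a + 0 = a := by ring

theorem check_adjecent_spec : Claim_equal_check_adjecent := by
  intro x y data _ hpre
  obtain ⟨hr, hc, _hrect, hx0, hxr, hy0, hyc⟩ := hpre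
  unfold Spec_check_adjecent
  cases data with
  | nil => simp at hr
  | cons a l =>
    simp only [List.headD] at hc hyc
    simp only [check_adjecent, check_adjecent_alt, List.foldl,
      PySem.List.pyGet?_zero_cons, Option.getD_some]
    rw [if_pos (show (0:Int) ≤ x ∧ x < ((a :: l).length : Int) ∧ 0 ≤ y ∧ y < (a.length : Int) from ⟨hx0, hxr, hy0, hyc⟩)]
    by_cases hx : x = 0
    · by_cases hy : y = 0
      · rw [if_pos hx, if_pos hy]
        rw [pvStepB_out x y ((a :: l).length : Int) (a.length : Int) (a :: l) _ (-1) (-1) (by omega)]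
        rw [pvStepB_out x y ((a :: l).length : Int) (a.length : Int) (a :: l) _ (-1) (0) (by omega)]
        rw [pvStepB_out x y ((a :: l).length : Int) (a.length : Int) (a :: l) _ (-1) (1) (by omega)]
        rw [pvStepB_out x y ((a :: l).length : Int) (a.length : Int) (a :: l) _ (0) (-1) (by omega)]
        rw [pvStepB_in x y ((a :: l).length : Int) (a.length : Int) (a :: l) _ (0) (1) (by omega)]
        rw [pvStepB_out x y ((a :: l).length : Int) (a.length : Int) (a :: l) _ (1) (-1) (by omega)]
        rw [pvStepB_in x y ((a :: l).length : Int) (a.length : Int) (a :: l) _ (1) (0) (by omega)]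
        rw [pvStepB_in x y ((a :: l).length : Int) (a.length : Int) (a :: l) _ (1) (1) (by omega)]
        simp only [List.foldl, pv_add_zero]
      · by_cases hyl : y = (a.length : Int) - 1
        · rw [if_pos hx, if_neg hy, if_pos hyl]
          rw [pvStepB_out x y ((a :: l).length : Int) (a.length : Int) (a :: l) _ (-1) (-1) (by omega)]
          rw [pvStepB_out x y ((a :: l).length : Int) (a.length : Int) (a :: l) _ (-1) (0) (by omega)]
          rw [pvStepB_out x y ((a :: l).length : Int) (a.length : Int) (a :: l) _ (-1) (1) (by omega)]
          rw [pvStepB_in x y ((a :: l).length : Int) (a.length : Int) (a :: l) _ (0) (-1) (by omega)]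
          rw [pvStepB_out x y ((a :: l).length : Int) (a.length : Int) (a :: l) _ (0) (1) (by omega)]
          rw [pvStepB_in x y ((a :: l).length : Int) (a.length : Int) (a :: l) _ (1) (-1) (by omega)]
          rw [pvStepB_in x y ((a :: l).length : Int) (a.length : Int) (a :: l) _ (1) (0) (by omega)]
          rw [pvStepB_out x y ((a :: l).length : Int) (a.length : Int) (a :: l) _ (1) (1) (by omega)]
          simp only [List.foldl, pv_add_neg_one, pv_add_zero]
        · rw [if_pos hx, if_neg hy, if_neg hyl]
          rw [pvStepB_out x y ((a :: l).length : Int) (a.length : Int) (a :: l) _ (-1) (-1) (by omega)]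
          rw [pvStepB_out x y ((a :: l).length : Int) (a.length : Int) (a :: l) _ (-1) (0) (by omega)]
          rw [pvStepB_out x y ((a :: l).length : Int) (a.length : Int) (a :: l) _ (-1) (1) (by omega)]
          rw [pvStepB_in x y ((a :: l).length : Int) (a.length : Int) (a :: l) _ (0) (-1) (by omega)]
          rw [pvStepB_in x y ((a :: l).length : Int) (a.length : Int) (a :: l) _ (0) (1) (by omega)]
          rw [pvStepB_in x y ((a :: l).length : Int) (a.length : Int) (a :: l) _ (1) (-1) (by omega)]
          rw [pvStepB_in x y ((a :: l).length : Int) (a.length : Int) (a :: l) _ (1) (0) (by omega)]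
          rw [pvStepB_in x y ((a :: l).length : Int) (a.length : Int) (a :: l) _ (1) (1) (by omega)]
          simp only [List.foldl, pv_add_neg_one, pv_add_zero]
    · by_cases hy : y = 0
      · by_cases hxl : x = (((a :: l).length : Int)) - 1
        · rw [if_neg hx, if_pos hy, if_pos hxl]
          rw [pvStepB_out x y ((a :: l).length : Int) (a.length : Int) (a :: l) _ (-1) (-1) (by omega)]
          rw [pvStepB_in x y ((a :: l).length : Int) (a.length : Int) (a :: l) _ (-1) (0) (by omega)]
          rw [pvStepB_in x y ((a :: l).length : Int) (a.length : Int) (a :: l) _ (-1) (1) (by omega)]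
          rw [pvStepB_out x y ((a :: l).length : Int) (a.length : Int) (a :: l) _ (0) (-1) (by omega)]
          rw [pvStepB_in x y ((a :: l).length : Int) (a.length : Int) (a :: l) _ (0) (1) (by omega)]
          rw [pvStepB_out x y ((a :: l).length : Int) (a.length : Int) (a :: l) _ (1) (-1) (by omega)]
          rw [pvStepB_out x y ((a :: l).length : Int) (a.length : Int) (a :: l) _ (1) (0) (by omega)]
          rw [pvStepB_out x y ((a :: l).length : Int) (a.length : Int) (a :: l) _ (1) (1) (by omega)]
          simp only [List.foldl, pv_add_neg_one, pv_add_zero]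
        · rw [if_neg hx, if_pos hy, if_neg hxl]
          rw [pvStepB_out x y ((a :: l).length : Int) (a.length : Int) (a :: l) _ (-1) (-1) (by omega)]
          rw [pvStepB_in x y ((a :: l).length : Int) (a.length : Int) (a :: l) _ (-1) (0) (by omega)]
          rw [pvStepB_in x y ((a :: l).length : Int) (a.length : Int) (a :: l) _ (-1) (1) (by omega)]
          rw [pvStepB_out x y ((a :: l).length : Int) (a.length : Int) (a :: l) _ (0) (-1) (by omega)]
          rw [pvStepB_in x y ((a :: l).length : Int) (a.length : Int) (a :: l) _ (0) (1) (by omega)]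
          rw [pvStepB_out x y ((a :: l).length : Int) (a.length : Int) (a :: l) _ (1) (-1) (by omega)]
          rw [pvStepB_in x y ((a :: l).length : Int) (a.length : Int) (a :: l) _ (1) (0) (by omega)]
          rw [pvStepB_in x y ((a :: l).length : Int) (a.length : Int) (a :: l) _ (1) (1) (by omega)]
          simp only [List.foldl, pv_add_neg_one, pv_add_zero]
      · by_cases hyl : y = (a.length : Int) - 1
        · by_cases hxl : x = (((a :: l).length : Int)) - 1
          · rw [if_neg hx, if_neg hy, if_pos hyl, if_pos hxl]
            rw [pvStepB_in x y ((a :: l).length : Int) (a.length : Int) (a :: l) _ (-1) (-1) (by omega)]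
            rw [pvStepB_in x y ((a :: l).length : Int) (a.length : Int) (a :: l) _ (-1) (0) (by omega)]
            rw [pvStepB_out x y ((a :: l).length : Int) (a.length : Int) (a :: l) _ (-1) (1) (by omega)]
            rw [pvStepB_in x y ((a :: l).length : Int) (a.length : Int) (a :: l) _ (0) (-1) (by omega)]
            rw [pvStepB_out x y ((a :: l).length : Int) (a.length : Int) (a :: l) _ (0) (1) (by omega)]
            rw [pvStepB_out x y ((a :: l).length : Int) (a.length : Int) (a :: l) _ (1) (-1) (by omega)]
            rw [pvStepB_out x y ((a :: l).length : Int) (a.length : Int) (a :: l) _ (1) (0) (by omega)]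
            rw [pvStepB_out x y ((a :: l).length : Int) (a.length : Int) (a :: l) _ (1) (1) (by omega)]
            simp only [List.foldl, pv_add_neg_one, pv_add_zero]
          · rw [if_neg hx, if_neg hy, if_pos hyl, if_neg hxl]
            rw [pvStepB_in x y ((a :: l).length : Int) (a.length : Int) (a :: l) _ (-1) (-1) (by omega)]
            rw [pvStepB_in x y ((a :: l).length : Int) (a.length : Int) (a :: l) _ (-1) (0) (by omega)]
            rw [pvStepB_out x y ((a :: l).length : Int) (a.length : Int) (a :: l) _ (-1) (1) (by omega)]
            rw [pvStepB_in x y ((a :: l).length : Int) (a.length : Int) (a :: l) _ (0) (-1) (by omega)]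
            rw [pvStepB_out x y ((a :: l).length : Int) (a.length : Int) (a :: l) _ (0) (1) (by omega)]
            rw [pvStepB_in x y ((a :: l).length : Int) (a.length : Int) (a :: l) _ (1) (-1) (by omega)]
            rw [pvStepB_in x y ((a :: l).length : Int) (a.length : Int) (a :: l) _ (1) (0) (by omega)]
            rw [pvStepB_out x y ((a :: l).length : Int) (a.length : Int) (a :: l) _ (1) (1) (by omega)]
            simp only [List.foldl, pv_add_neg_one, pv_add_zero]
        · by_cases hxl : x = (((a :: l).length : Int)) - 1
          · rw [if_neg hx, if_neg hy, if_neg hyl, if_pos hxl]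
            rw [pvStepB_in x y ((a :: l).length : Int) (a.length : Int) (a :: l) _ (-1) (-1) (by omega)]
            rw [pvStepB_in x y ((a :: l).length : Int) (a.length : Int) (a :: l) _ (-1) (0) (by omega)]
            rw [pvStepB_in x y ((a :: l).length : Int) (a.length : Int) (a :: l) _ (-1) (1) (by omega)]
            rw [pvStepB_in x y ((a :: l).length : Int) (a.length : Int) (a :: l) _ (0) (-1) (by omega)]
            rw [pvStepB_in x y ((a :: l).length : Int) (a.length : Int) (a :: l) _ (0) (1) (by omega)]
            rw [pvStepB_out x y ((a :: l).length : Int) (a.length : Int) (a :: l) _ (1) (-1) (by omega)]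
            rw [pvStepB_out x y ((a :: l).length : Int) (a.length : Int) (a :: l) _ (1) (0) (by omega)]
            rw [pvStepB_out x y ((a :: l).length : Int) (a.length : Int) (a :: l) _ (1) (1) (by omega)]
            simp only [List.foldl, pv_add_neg_one, pv_add_zero]
          · rw [if_neg hx, if_neg hy, if_neg hyl, if_neg hxl]
            rw [pvStepB_in x y ((a :: l).length : Int) (a.length : Int) (a :: l) _ (-1) (-1) (by omega)]
            rw [pvStepB_in x y ((a :: l).length : Int) (a.length : Int) (a :: l) _ (-1) (0) (by omega)]
            rw [pvStepB_in x y ((a :: l).length : Int) (a.length : Int) (a :: l) _ (-1) (1) (by omega)]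
            rw [pvStepB_in x y ((a :: l).length : Int) (a.length : Int) (a :: l) _ (0) (-1) (by omega)]
            rw [pvStepB_in x y ((a :: l).length : Int) (a.length : Int) (a :: l) _ (0) (1) (by omega)]
            rw [pvStepB_in x y ((a :: l).length : Int) (a.length : Int) (a :: l) _ (1) (-1) (by omega)]
            rw [pvStepB_in x y ((a :: l).length : Int) (a.length : Int) (a :: l) _ (1) (0) (by omega)]
            rw [pvStepB_in x y ((a :: l).length : Int) (a.length : Int) (a :: l) _ (1) (1) (by omega)]
            simp only [List.foldl, pv_add_neg_one, pv_add_zero]
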